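-- pv_equiv track=rewrite | github.com/pranavsutar/DSA-programs-in-cpp | CDassignment1.py | dottify
-- ===== SOURCE A (Python) =====
-- def dottify(s):
--     if s == '':
--         return s
--     t = s[0]; n = len(s)
--     for i in range(1,n):
--         if (s[i-1] in '(|.') :
--                 t += s[i]
--         elif (s[i] in ')|*?+.') :
--                 t += s[i]
--         else:
--             t += '.' + s[i]
--     return t
-- ===== SOURCE B (Python) =====
-- def dottify(s):
--     # Stage 1: insert a dot between every pair of adjacent characters.
--     dotted = '.'.join(s)
--     # Stage 2: drop each inserted dot (odd index) whose neighbours forbid it.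
--     return ''.join(ch for i, ch in enumerate(dotted)
--                    if i % 2 == 0
--                    or not (dotted[i - 1] in '(|.' or dotted[i + 1] in ')|*?+.'))
-- ===== Notes on version B (the rewrite author's own statement) =====
-- stated objective: alternative
-- what changed: A inserts dots conditionally in one pass over index pairs; B uses two staged passes: a join first inserts a dot between every adjacent pair, then a second pass deletes each inserted dot (odd index) whose left or right neighbour is one of the forbidden lexer metacharacters.
import Mathlib
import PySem

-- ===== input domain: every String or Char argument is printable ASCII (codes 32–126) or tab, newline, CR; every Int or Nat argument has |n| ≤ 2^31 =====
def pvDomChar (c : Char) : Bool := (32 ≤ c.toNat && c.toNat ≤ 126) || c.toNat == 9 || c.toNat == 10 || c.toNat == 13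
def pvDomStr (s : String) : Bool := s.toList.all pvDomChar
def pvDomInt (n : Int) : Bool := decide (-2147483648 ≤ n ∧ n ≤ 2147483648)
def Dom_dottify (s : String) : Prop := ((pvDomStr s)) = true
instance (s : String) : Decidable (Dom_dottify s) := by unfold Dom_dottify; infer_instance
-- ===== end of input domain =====

-- B replaces A's conditional single-pass insertion by two staged passes: first insert a
-- dot between every adjacent pair ('.'.join), then delete the inserted dots whose
-- neighbours forbid them (objective: alternative; same O(n) cost).

-- ===== PORT A =====
-- the body of A's loop for index i: t += s[i] / t += '.' + s[i] per the two membership tests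
def dottifyStep (cs : List Char) (t : List Char) (i : Int) : List Char :=
  match PySem.List.pyGet? cs (i - 1), PySem.List.pyGet? cs i with
  | some a, some b =>
      if a ∈ ['(', '|', '.'] then t ++ [b]
      else if b ∈ [')', '|', '*', '?', '+', '.'] then t ++ [b]
      else t ++ ['.', b]
  | _, _ => t   -- unreachable for i ∈ range(1, n)

def dottify (s : String) : String :=
  if s = "" then s
  else
    let cs := s.toList
    let n : Int := (cs.length : Int)
    String.mk ((PySem.List.pyRange 1 n 1).foldl (dottifyStep cs) (cs.take 1))

-- ===== PORT B =====
-- the comprehension's keep-condition for (i, ch): keep even positions (original chars),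
-- and an inserted dot only when dotted[i-1] ∉ '(|.' and dotted[i+1] ∉ ')|*?+.'
-- (for odd i both indices are always in range, so the getD default ' ' is unreachable)
def keepB (dotted : List Char) (p : Int × Char) : Bool :=
  p.1 % 2 == 0 ||
  !(decide ((PySem.List.pyGet? dotted (p.1 - 1)).getD ' ' ∈ ['(', '|', '.']) ||
    decide ((PySem.List.pyGet? dotted (p.1 + 1)).getD ' ' ∈ [')', '|', '*', '?', '+', '.']))

def dottify_alt (s : String) : String :=
  let dotted := List.intersperse '.' s.toList        -- '.'.join(s)
  String.mk (((PySem.List.enumerate dotted).filter (keepB dotted)).map Prod.snd)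

-- ===== PRECONDITION & SPEC =====
def Spec_dottify (s : String) (out : String) : Prop := out = dottify_alt s
instance (s : String) (out : String) : Decidable (Spec_dottify s out) := by unfold Spec_dottify; infer_instance

-- ===== CLAIM (what is proved, stated in full; the proofs are below) =====
def Claim_equal_dottify : Prop := ∀ (s : String), Dom_dottify s → Spec_dottify s (dottify s)

-- ===== LEMMAS AND PROOFS =====

-- what A's loop emits for the pair (a, b) = (s[i-1], s[i])
def gPair (p : Char × Char) : List Char :=
  if p.1 ∈ ['(', '|', '.'] then [p.2]
  else if p.2 ∈ [')', '|', '*', '?', '+', '.'] then [p.2]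
  else ['.', p.2]

theorem dottifyStep_eq (cs : List Char) (t : List Char) (k : Nat)
    (h1 : 1 ≤ k) (h2 : k < cs.length) :
    dottifyStep cs t (k : Int) = t ++ gPair (cs[k - 1], cs[k]) := by
  have hk1 : ((k : Int) - 1) = ((k - 1 : Nat) : Int) := by omega
  simp only [dottifyStep, hk1, PySem.List.pyGet?_natCast]
  have h3 : k - 1 < cs.length := by omega
  simp only [List.getElem?_eq_getElem, h2, h3, gPair]
  split_ifs <;> rfl

theorem loopA (cs : List Char) (k : Nat) (h1 : 1 ≤ k) :
    ∀ t, (PySem.List.pyRange (k : Int) (cs.length : Int) 1).foldl (dottifyStep cs) t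
      = t ++ ((cs.drop (k - 1)).zip (cs.drop k)).flatMap gPair := by
  by_cases h : k < cs.length
  · intro t
    have hcons : PySem.List.pyRange (k : Int) (cs.length : Int) 1
        = (k : Int) :: PySem.List.pyRange ((k : Int) + 1) (cs.length : Int) 1 :=
      PySem.List.pyRange_one_cons (by exact_mod_cast h)
    have hk1 : ((k : Int) + 1) = ((k + 1 : Nat) : Int) := by push_cast; ring
    have ih := loopA cs (k + 1) (by omega)
    have hdrop1 : cs.drop (k - 1) = cs[k - 1] :: cs.drop k := by
      have h3 : k - 1 < cs.length := by omega
      have h4 : k - 1 + 1 = k := by omega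
      rw [List.drop_eq_getElem_cons h3, h4]
    have hdrop2 : cs.drop k = cs[k] :: cs.drop (k + 1) := List.drop_eq_getElem_cons h
    rw [hcons, List.foldl_cons, dottifyStep_eq cs t k h1 h, hk1, ih,
        hdrop1, hdrop2, List.zip_cons_cons, List.flatMap_cons]
    simp [List.append_assoc]
  · intro t
    have hnil : PySem.List.pyRange (k : Int) (cs.length : Int) 1 = [] :=
      PySem.List.pyRange_one_eq_nil (by exact_mod_cast Nat.le_of_not_lt h)
    have hd : cs.drop k = [] := List.drop_eq_nil_of_le (Nat.le_of_not_lt h)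
    rw [hnil, hd]
    simp
termination_by cs.length - k

-- B's stage 2 on the interspersion of d :: rs, embedded in the full dotted list D
-- at even offset j, yields exactly d followed by A's per-pair emissions.
theorem coreB (D : List Char) : ∀ (rs : List Char) (d : Char) (j : Nat),
    j % 2 = 0 →
    (∀ k : Nat, (List.intersperse '.' (d :: rs))[k]? = D[j + k]?) →
    ((PySem.List.enumerate (List.intersperse '.' (d :: rs)) (j : Int)).filter (keepB D)).map Prod.snd
      = d :: ((d :: rs).zip rs).flatMap gPair
  | [], d, j, hj, _ => by
    have : ((j : Int)) % 2 == 0 := by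
      have : (j : Int) % 2 = 0 := by omega
      simp [this]
    simp [PySem.List.enumerate_cons, PySem.List.enumerate_nil, keepB, this]
  | e :: rs', d, j, hj, hD => by
    have hsp : List.intersperse '.' (d :: e :: rs') = d :: '.' :: List.intersperse '.' (e :: rs') := by
      simp [List.intersperse]
    have hD0 : D[j]? = some d := by
      have := hD 0; rw [hsp] at this; simpa using this.symm
    have hD2 : D[j + 2]? = some e := by
      have := hD 2; rw [hsp] at this
      have he : (List.intersperse '.' (e :: rs'))[0]? = some e := by
        cases rs' <;> simp [List.intersperse]
      simpa [he] using this.symm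
    have ih := coreB D rs' e (j + 2) (by omega) (by
      intro k
      have := hD (k + 2); rw [hsp] at this
      have harith : j + (k + 2) = j + 2 + k := by omega
      simpa [harith] using this)
    -- keep-values of the first two entries
    have hkeep0 : keepB D ((j : Int), d) = true := by
      have h2 : (j : Int) % 2 = 0 := by omega
      simp [keepB, h2]
    have hodd : ((j : Int) + 1) % 2 = 1 := by omega
    have hkeep1 : keepB D ((j : Int) + 1, '.')
        = !(decide (d ∈ ['(', '|', '.']) || decide (e ∈ [')', '|', '*', '?', '+', '.'])) := by
      have e1 : ((j : Int) + 1 - 1) = ((j : Nat) : Int) := by ring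
      have e2 : ((j : Int) + 1 + 1) = (((j + 2 : Nat)) : Int) := by push_cast; ring
      simp only [keepB, e1, e2, PySem.List.pyGet?_natCast, hD0, hD2, Option.getD_some]
      simp [hodd]
    have hcast : ((j : Int) + 1 + 1) = (((j + 2 : Nat)) : Int) := by push_cast; ring
    rw [hsp, PySem.List.enumerate_cons, PySem.List.enumerate_cons, hcast,
        List.filter_cons, List.filter_cons, hkeep0, hkeep1]
    by_cases h1 : d ∈ ['(', '|', '.']
    · simp only [List.zip_cons_cons, List.flatMap_cons]
      simp [h1, gPair]
      exact_mod_cast ih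
    · by_cases h2 : e ∈ [')', '|', '*', '?', '+', '.']
      · simp only [List.zip_cons_cons, List.flatMap_cons]
        simp [h1, h2, gPair]
        exact_mod_cast ih
      · simp only [List.zip_cons_cons, List.flatMap_cons]
        simp [h1, h2, gPair]
        exact_mod_cast ih

-- ===== VERDICT (by name: the statement is the Claim_ definition above) =====
theorem dottify_spec : Claim_equal_dottify := by
  intro s _
  unfold Spec_dottify dottify dottify_alt
  by_cases hs : s = ""
  · subst hs; rfl
  · simp only [if_neg hs]
    have hne : s.toList ≠ [] := by
      intro h
      exact hs (by rw [← String.ofList_toList (s := s), h])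
    obtain ⟨c, rest, hcr⟩ := List.exists_cons_of_ne_nil hne
    rw [hcr]
    have h1 := loopA (c :: rest) 1 (le_refl 1) ([c])
    simp only [Nat.cast_one, Nat.sub_self, List.drop_zero, List.drop_one] at h1
    rw [show List.take 1 (c :: rest) = [c] from rfl, h1]
    have hB := coreB (List.intersperse '.' (c :: rest)) rest c 0 rfl (by intro k; simp)
    rw [show ((0 : Nat) : Int) = 0 from rfl] at hB
    rw [hB]
    simp
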